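-- pv_equiv track=rewrite | github.com/CorradoColaleo/AlgoFobia | Backtracking/[LeetCode] BeautifulArray.py | is_a_solution
-- ===== SOURCE A (Python) =====
-- def is_a_solution(current):
--     for i in range(len(current)):
--         if (0<i<(len(current)-1)):
--             for indice1 in range(0,i):
--                 for indice2 in range(i+1,len(current)):
--                     if (2*current[i]) == (current[indice1]+current[indice2]):
--                         return False
--     return True
-- ===== SOURCE B (Python) =====
-- def is_a_solution(current):
--     # One pass building a hash set of left elements; for each middle v and each
--     # right w, test whether the needed left complement 2*v - w was already seen.
--     seen = set()
--     for i, v in enumerate(current):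
--         for w in current[i + 1:]:
--             if (2 * v - w) in seen:
--                 return False
--         seen.add(v)
--     return True
-- ===== Notes on version B (the rewrite author's own statement) =====
-- stated objective: alternative
-- what changed: Replaces the triple nested index loop (middle, left, right) by a single left-to-right pass that maintains a hash set of already-seen left elements and, for each middle/right pair, tests membership of the needed complement 2*mid - right in that set (O(n^2) worst case vs A's O(n^3); a timing run's inputs exit early, so no speed-up was measured).
import Mathlib
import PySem

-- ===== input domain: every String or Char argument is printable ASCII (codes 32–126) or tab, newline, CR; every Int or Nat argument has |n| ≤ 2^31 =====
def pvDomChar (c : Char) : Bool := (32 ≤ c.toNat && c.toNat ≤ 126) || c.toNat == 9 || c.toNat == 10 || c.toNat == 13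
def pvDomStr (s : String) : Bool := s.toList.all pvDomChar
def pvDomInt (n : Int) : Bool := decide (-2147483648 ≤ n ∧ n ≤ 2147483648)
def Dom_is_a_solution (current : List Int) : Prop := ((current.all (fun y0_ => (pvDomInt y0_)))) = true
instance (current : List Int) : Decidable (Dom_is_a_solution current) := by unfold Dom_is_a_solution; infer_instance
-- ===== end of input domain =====

-- B replaces A's triple nested index loop by one pass with a hash set of the
-- already-seen left elements, testing the complement 2*mid - right (objective: alternative — a set-based one-pass formulation).

-- ===== PORT A =====
-- for i in range(len(current)): if 0<i<len-1: for i1 in range(0,i): for i2 in range(i+1,len): if 2c[i]==c[i1]+c[i2]: return False; return True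
def is_a_solution (current : List Int) : Bool :=
  (PySem.List.pyRange 0 (PySem.List.len current) 1).all (fun i =>
    if 0 < i ∧ i < PySem.List.len current - 1 then
      (PySem.List.pyRange 0 i 1).all (fun indice1 =>
        (PySem.List.pyRange (i + 1) (PySem.List.len current) 1).all (fun indice2 =>
          !(2 * PySem.List.pyGetD current i 0 ==
              PySem.List.pyGetD current indice1 0 + PySem.List.pyGetD current indice2 0)))
    else true)

-- ===== PORT B =====
-- for i, v in enumerate(current): for w in current[i+1:]: if 2*v - w in seen: return False; seen.add(v); return True
-- recursion on the list: at each step `rest` is current[i+1:] and `seen` holds the elements before v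
def altGo (seen : PySem.Set Int) : List Int → Bool
  | [] => true
  | v :: rest =>
      if rest.any (fun w => PySem.Set.contains seen (2 * v - w)) then false
      else altGo (PySem.Set.add seen v) rest

def is_a_solution_alt (current : List Int) : Bool :=
  altGo PySem.Set.empty current

-- ===== PRECONDITION & SPEC =====
def Spec_is_a_solution (current : List Int) (out : Bool) : Prop := out = is_a_solution_alt current
instance (current : List Int) (out : Bool) : Decidable (Spec_is_a_solution current out) := by unfold Spec_is_a_solution; infer_instance

-- ===== CLAIM (what is proved, stated in full; the proofs are below) =====
def Claim_equal_is_a_solution : Prop := ∀ (current : List Int), Dom_is_a_solution current → Spec_is_a_solution current (is_a_solution current)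

-- ===== LEMMAS AND PROOFS =====

-- the common characterisation: no index j is the arithmetic mean of a pair flanking it
def NoTriple (c : List Int) : Prop :=
  ∀ i j k : Nat, i < j → j < k → k < c.length →
    2 * c.getD j 0 ≠ c.getD i 0 + c.getD k 0

lemma A_iff (c : List Int) : is_a_solution c = true ↔ NoTriple c := by
  unfold is_a_solution NoTriple
  rw [List.all_eq_true]
  simp only [PySem.List.mem_pyRange_one, PySem.List.len_eq]
  constructor
  · intro h i j k hij hjk hk
    have hj := h (j : Int) ⟨by omega, by omega⟩
    rw [if_pos (by constructor <;> omega)] at hj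
    simp only [List.all_eq_true, PySem.List.mem_pyRange_one] at hj
    have := hj (i : Int) ⟨by omega, by omega⟩ (k : Int) ⟨by omega, by omega⟩
    simpa using this
  · intro h i hi
    split_ifs with hmid
    · simp only [List.all_eq_true, PySem.List.mem_pyRange_one]
      intro i1 hi1 i2 hi2
      lift i to ℕ using hi.1 with j
      lift i1 to ℕ using hi1.1 with a
      lift i2 to ℕ using (by omega : (0:ℤ) ≤ i2) with b
      have := h a j b (by omega) (by omega) (by omega)
      simpa using this
    · rfl

lemma altGo_iff (l : List Int) (s : List Int) :
    altGo s l = true ↔ ∀ j k : Nat, j < k → k < l.length →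
      (2 * l.getD j 0 - l.getD k 0) ∉ s ∧
        ∀ i : Nat, i < j → l.getD i 0 ≠ 2 * l.getD j 0 - l.getD k 0 := by
  induction l generalizing s with
  | nil =>
    constructor
    · exact fun _ j k _ hk => absurd hk (by simp)
    · exact fun _ => rfl
  | cons v rest ih =>
    rw [altGo]
    by_cases hany : rest.any (fun w => PySem.Set.contains s (2 * v - w)) = true
    · rw [if_pos hany]
      obtain ⟨w, hw, hcont⟩ := List.any_eq_true.mp hany
      obtain ⟨k', hk', rfl⟩ := List.mem_iff_getElem.mp hw
      apply iff_of_false (by simp)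
      intro hR
      have h1 := (hR 0 (k' + 1) (by omega) (by simp only [List.length_cons]; omega)).1
      apply h1
      rw [List.getD_cons_zero, List.getD_cons_succ, List.getD_eq_getElem rest 0 hk']
      exact (PySem.Set.contains_iff _ _).mp hcont
    · rw [if_neg hany, ih]
      constructor
      · -- rest with (add s v)  →  v :: rest with s
        intro h2 j k hjk hk
        match j, hjk with
        | 0, _ =>
          obtain ⟨k', rfl⟩ : ∃ k', k = k' + 1 := ⟨k - 1, by omega⟩
          have hk' : k' < rest.length := by simp only [List.length_cons] at hk; omega
          refine ⟨?_, fun i hi => by omega⟩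
          intro hm
          apply hany
          rw [List.getD_cons_zero, List.getD_cons_succ, List.getD_eq_getElem rest 0 hk'] at hm
          exact List.any_eq_true.mpr ⟨rest[k'], List.getElem_mem hk',
            (PySem.Set.contains_iff _ _).mpr hm⟩
        | j' + 1, _ =>
          obtain ⟨k', rfl⟩ : ∃ k', k = k' + 1 := ⟨k - 1, by omega⟩
          have hk' : k' < rest.length := by simp only [List.length_cons] at hk; omega
          have H := h2 j' k' (by omega) hk'
          simp only [List.getD_cons_succ]
          refine ⟨fun hm => H.1 ?_, fun i hi => ?_⟩
          · rw [PySem.Set.mem_add]; exact Or.inl hm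
          · match i, hi with
            | 0, _ =>
              rw [List.getD_cons_zero]
              intro hv
              apply H.1
              rw [PySem.Set.mem_add]
              exact Or.inr hv.symm
            | i' + 1, _ =>
              rw [List.getD_cons_succ]
              exact H.2 i' (by omega)
      · -- v :: rest with s  →  rest with (add s v)
        intro h2 j k hjk hk
        have H := h2 (j + 1) (k + 1) (by omega) (by simp only [List.length_cons]; omega)
        simp only [List.getD_cons_succ] at H
        refine ⟨?_, fun i hi => ?_⟩
        · rw [PySem.Set.mem_add]
          rintro (hm | hv)
          · exact H.1 hm
          · exact H.2 0 (by omega) (by rw [List.getD_cons_zero]; exact hv.symm)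
        · have := H.2 (i + 1) (by omega)
          rwa [List.getD_cons_succ] at this

lemma B_iff (c : List Int) : is_a_solution_alt c = true ↔ NoTriple c := by
  unfold is_a_solution_alt NoTriple
  rw [altGo_iff]
  constructor
  · intro h i j k hij hjk hk
    have := (h j k hjk hk).2 i hij
    omega
  · intro h j k hjk hk
    refine ⟨by simp [PySem.Set.empty], fun i hi => ?_⟩
    have := h i j k hi hjk hk
    omega

-- ===== VERDICT (by name: the statement is the Claim_ definition above) =====
theorem is_a_solution_spec : Claim_equal_is_a_solution := by
  intro c _
  unfold Spec_is_a_solution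
  have hA := A_iff c
  have hB := B_iff c
  cases h1 : is_a_solution c <;> cases h2 : is_a_solution_alt c <;> simp_all
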